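-- pv_equiv track=rewrite | github.com/beansthelightkeeper/QuantumOracle | The_OracleV12.py | calculate_polybius_square_gematria
-- ===== SOURCE A (Python) =====
-- def calculate_polybius_square_gematria(word: str) -> int:
--     POLYBIUS_GRID = [['A', 'B', 'C', 'D', 'E'], ['F', 'G', 'H', 'I/J', 'K'], ['L', 'M', 'N', 'O', 'P'], ['Q', 'R', 'S', 'T', 'U'], ['V', 'W', 'X', 'Y', 'Z']]
--     polybius_map = {}
--     for r_idx, row in enumerate(POLYBIUS_GRID):
--         for c_idx, char_entry in enumerate(row):
--             if '/' in char_entry: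
--                 for p_char in char_entry.split('/'): polybius_map[p_char] = (r_idx + 1, c_idx + 1)
--             else: polybius_map[char_entry] = (r_idx + 1, c_idx + 1)
--     total_value = 0
--     for c in word.upper():
--         if c == 'J': c = 'I'
--         if c in polybius_map: total_value += (polybius_map[c][0] + polybius_map[c][1])
--     return total_value
-- ===== SOURCE B (Python) =====
-- def calculate_polybius_square_gematria(word: str) -> int:
--     total = 0
--     for c in word.upper():
--         if c == 'J':
--             c = 'I'
--         if 'A' <= c <= 'Z':
--             idx = ord(c) - ord('A')
--             if c > 'I':
--                 idx -= 1
--             total += idx // 5 + idx % 5 + 2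
--     return total
-- ===== Notes on version B (the rewrite author's own statement) =====
-- stated objective: simpler
-- what changed: B drops the Polybius grid and the dict built from it and computes each letter's coordinates in closed form from its character code (J folded to I, index in the 25-letter alphabet, row = idx//5, col = idx%5).
import Mathlib
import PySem

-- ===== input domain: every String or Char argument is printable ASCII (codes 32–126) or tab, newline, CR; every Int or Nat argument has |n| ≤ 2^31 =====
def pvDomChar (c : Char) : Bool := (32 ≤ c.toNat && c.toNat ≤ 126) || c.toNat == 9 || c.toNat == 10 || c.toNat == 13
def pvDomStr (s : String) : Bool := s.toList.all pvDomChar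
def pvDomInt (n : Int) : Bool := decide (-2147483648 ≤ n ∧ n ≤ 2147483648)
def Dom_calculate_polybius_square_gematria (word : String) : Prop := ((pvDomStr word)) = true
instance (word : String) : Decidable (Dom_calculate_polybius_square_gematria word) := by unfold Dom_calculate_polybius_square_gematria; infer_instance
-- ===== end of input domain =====

-- B replaces A's grid-built dict with closed-form coordinate arithmetic on the character code (objective: simpler).

-- ===== PORT A =====
-- A-side helpers: the grid, the dict built from it, and the loop body, exactly as A writes them.
def pvGridA : List (List String) :=
  [["A", "B", "C", "D", "E"], ["F", "G", "H", "I/J", "K"], ["L", "M", "N", "O", "P"],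
   ["Q", "R", "S", "T", "U"], ["V", "W", "X", "Y", "Z"]]

def pvPolybiusMap : PySem.Dict String (Int × Int) :=
  (PySem.List.enumerate pvGridA).foldl (fun m rp =>
    (PySem.List.enumerate rp.2).foldl (fun m cp =>
      if PySem.Str.isIn "/" cp.2 then
        ((PySem.Str.split? cp.2 "/").getD []).foldl (fun m p => m.insert p (rp.1 + 1, cp.1 + 1)) m
      else m.insert cp.2 (rp.1 + 1, cp.1 + 1)) m) PySem.Dict.empty

def pvStepA (m : PySem.Dict String (Int × Int)) (total : Int) (c : Char) : Int :=
  match m.get? (String.mk [if c = 'J' then 'I' else c]) with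
  | some p => total + (p.1 + p.2)
  | none => total

def calculate_polybius_square_gematria (word : String) : Int :=
  (PySem.Str.upper word).toList.foldl (pvStepA pvPolybiusMap) 0

-- ===== PORT B =====
-- B-side helper: the loop body of Source B.
def pvStepB (total : Int) (c0 : Char) : Int :=
  let c := if c0 = 'J' then 'I' else c0
  if 'A' ≤ c ∧ c ≤ 'Z' then
    let idx : Int := (c.toNat : Int) - 65
    let idx2 : Int := if 'I' < c then idx - 1 else idx
    total + (PySem.Int.floordiv idx2 5 + PySem.Int.mod idx2 5 + 2)
  else total

def calculate_polybius_square_gematria_alt (word : String) : Int :=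
  (PySem.Str.upper word).toList.foldl pvStepB 0

-- ===== PRECONDITION & SPEC =====
def Spec_calculate_polybius_square_gematria (word : String) (out : Int) : Prop := out = calculate_polybius_square_gematria_alt word
instance (word : String) (out : Int) : Decidable (Spec_calculate_polybius_square_gematria word out) := by unfold Spec_calculate_polybius_square_gematria; infer_instance

-- ===== CLAIM (what is proved, stated in full; the proofs are below) =====
def Claim_equal_calculate_polybius_square_gematria : Prop := ∀ (word : String), Dom_calculate_polybius_square_gematria word → Spec_calculate_polybius_square_gematria word (calculate_polybius_square_gematria word)

-- ===== LEMMAS AND PROOFS =====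

lemma stepA_shift (m : PySem.Dict String (Int × Int)) (t : Int) (c : Char) :
    pvStepA m t c = t + pvStepA m 0 c := by
  unfold pvStepA
  cases m.get? (String.mk [if c = 'J' then 'I' else c]) <;> simp

lemma ite_add_shift (P : Prop) [Decidable P] (t v : Int) :
    (if P then t + v else t) = t + (if P then v else 0) := by
  by_cases h : P <;> simp [h]

lemma stepB_shift (t : Int) (c : Char) :
    pvStepB t c = t + pvStepB 0 c := by
  unfold pvStepB
  simp only [zero_add]
  exact ite_add_shift _ _ _

set_option maxRecDepth 4000 in
lemma step_eq_fin : ∀ n : Fin 128, pvStepA pvPolybiusMap 0 (Char.ofNat n.val) = pvStepB 0 (Char.ofNat n.val) := by decide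

lemma step_eq (c : Char) (h : c.toNat < 128) (t : Int) :
    pvStepA pvPolybiusMap t c = pvStepB t c := by
  have h0 := step_eq_fin ⟨c.toNat, h⟩
  simp only [Char.ofNat_toNat] at h0
  rw [stepA_shift, stepB_shift, h0]

lemma fold_eq (cs : List Char) (h : ∀ c ∈ cs, c.toNat < 128) (t : Int) :
    cs.foldl (pvStepA pvPolybiusMap) t = cs.foldl pvStepB t := by
  induction cs generalizing t with
  | nil => rfl
  | cons c cs ih =>
    simp only [List.foldl_cons]
    rw [step_eq c (h c (by simp)) t]
    exact ih (fun d hd => h d (by simp [hd])) _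

lemma upper_dom (c : Char) (h : pvDomChar c = true) : (PySem.Chars.upperChar c).toNat < 128 := by
  have hn : c.toNat < 128 := by
    simp only [pvDomChar, Bool.or_eq_true, Bool.and_eq_true, decide_eq_true_eq, beq_iff_eq] at h
    omega
  have key : ∀ m : Fin 128, pvDomChar (Char.ofNat m.val) = true → (PySem.Chars.upperChar (Char.ofNat m.val)).toNat < 128 := by decide
  have h2 := key ⟨c.toNat, hn⟩
  rw [Char.ofNat_toNat] at h2
  exact h2 h

-- ===== VERDICT (by name: the statement is the Claim_ definition above) =====
theorem calculate_polybius_square_gematria_spec : Claim_equal_calculate_polybius_square_gematria := by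
  intro word hdom
  unfold Spec_calculate_polybius_square_gematria calculate_polybius_square_gematria calculate_polybius_square_gematria_alt
  apply fold_eq
  intro c hc
  rw [PySem.Str.toList_upper] at hc
  obtain ⟨d, hd, rfl⟩ := List.mem_map.mp hc
  have : pvDomChar d = true := by
    unfold Dom_calculate_polybius_square_gematria pvDomStr at hdom
    exact List.all_eq_true.mp hdom d hd
  exact upper_dom d this
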